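-- pv_equiv track=rewrite | github.com/ycen2111/Little-Programe | Little_Project/Python/Nike_Intern/OKR/OKR1/fin_ver.py | seperate_msg_into_line
-- ===== SOURCE A (Python) =====
-- def seperate_msg_into_line(msg):
--     temp_msg=""
--     msg_in_line=[]
--
--     for char in msg:
--         if ord(char)==10:
--             msg_in_line.append(temp_msg)
--             temp_msg=""
--         elif ord(char)>-1 and ord(char)<32:
--             pass
--         else:
--             temp_msg+=char
--
--     msg_in_line.append(temp_msg) #record last line
--     return msg_in_line
-- ===== SOURCE B (Python) =====
-- def seperate_msg_into_line(msg):
--     # split on newline first, then drop control characters from each segment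
--     return [''.join(c for c in line if ord(c) >= 32) for line in msg.split('\n')]
-- ===== Notes on version B (the rewrite author's own statement) =====
-- stated objective: simpler
-- what changed: Replaces the single stateful character loop with a running buffer and flush-on-newline branch by a two-stage decomposition: split on newlines first, then filter each segment's characters (keep ord >= 32, since the ord > -1 guard is vacuous); the split/join built-ins also make it measurably faster.
import Mathlib
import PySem

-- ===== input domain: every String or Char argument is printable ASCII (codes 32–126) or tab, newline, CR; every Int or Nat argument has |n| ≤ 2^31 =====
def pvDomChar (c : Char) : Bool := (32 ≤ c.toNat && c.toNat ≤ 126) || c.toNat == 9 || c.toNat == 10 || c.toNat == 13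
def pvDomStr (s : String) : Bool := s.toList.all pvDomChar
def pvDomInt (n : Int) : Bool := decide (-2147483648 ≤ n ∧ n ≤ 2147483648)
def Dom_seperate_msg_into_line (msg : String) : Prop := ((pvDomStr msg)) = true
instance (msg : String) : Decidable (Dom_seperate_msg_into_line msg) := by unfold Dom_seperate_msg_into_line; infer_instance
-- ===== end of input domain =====

-- B replaces A's stateful char loop (running buffer, flush-on-newline) by split-on-'\n' then per-line char filter; objective: simpler.


-- ===== PORT A =====
-- one step of A's for-loop; state = (temp_msg as chars, msg_in_line)
def sepAStep (st : List Char × List String) (c : Char) : List Char × List String :=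
  if (c.toNat : Int) = 10 then ([], st.2 ++ [String.ofList st.1])
  else if (c.toNat : Int) > -1 ∧ (c.toNat : Int) < 32 then st
  else (st.1 ++ [c], st.2)

def seperate_msg_into_line (msg : String) : List String :=
  let st := msg.toList.foldl sepAStep ([], [])
  st.2 ++ [String.ofList st.1]  -- record last line

-- ===== PORT B =====
-- ''.join(c for c in line if ord(c) >= 32)
def sepBClean (l : List Char) : List Char := l.filter (fun c => 32 ≤ (c.toNat : Int))

def seperate_msg_into_line_alt (msg : String) : List String :=
  (PySem.Chars.splitOn msg.toList ['\n']).map (fun l => String.ofList (sepBClean l))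

-- ===== PRECONDITION & SPEC =====
def Spec_seperate_msg_into_line (msg : String) (out : List String) : Prop := out = seperate_msg_into_line_alt msg
instance (msg : String) (out : List String) : Decidable (Spec_seperate_msg_into_line msg out) := by unfold Spec_seperate_msg_into_line; infer_instance

-- ===== CLAIM (what is proved, stated in full; the proofs are below) =====
def Claim_equal_seperate_msg_into_line : Prop := ∀ (msg : String), Dom_seperate_msg_into_line msg → Spec_seperate_msg_into_line msg (seperate_msg_into_line msg)

-- ===== LEMMAS AND PROOFS =====

-- reference splitter: (current line so far, remaining completed lines)
def sepSplitP : List Char → List Char × List (List Char)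
  | [] => ([], [])
  | c :: cs =>
    let (h, t) := sepSplitP cs
    if c = '\n' then ([], h :: t) else (c :: h, t)

theorem sepSplitOn_go_eq (l : List Char) : ∀ (fuel : Nat) (cur : List Char) (acc : List (List Char)),
    l.length < fuel →
    PySem.Chars.splitOn.go ['\n'] fuel l cur acc
      = acc.reverse ++ (cur.reverse ++ (sepSplitP l).1) :: (sepSplitP l).2 := by
  induction l with
  | nil =>
    intro fuel cur acc h
    match fuel with
    | fuel + 1 => simp [PySem.Chars.splitOn.go, sepSplitP]
  | cons c cs ih =>
    intro fuel cur acc h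
    match fuel with
    | fuel + 1 =>
      rw [PySem.Chars.splitOn.go]
      by_cases hc : c = '\n'
      · subst hc
        simp only [List.isPrefixOf, BEq.rfl, Bool.true_and, if_true, List.length_cons,
          List.drop_succ_cons, List.length_nil, List.drop_zero]
        rw [ih fuel [] (cur.reverse :: acc) (by simpa using Nat.lt_of_succ_lt_succ h)]
        simp [sepSplitP]
      · have : (['\n'].isPrefixOf (c :: cs)) = false := by
          simp [List.isPrefixOf]; exact fun hh => (hc hh.symm).elim
        rw [this]
        simp only [Bool.false_eq_true, if_false]
        rw [ih fuel (c :: cur) acc (by simpa using Nat.lt_of_succ_lt_succ h)]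
        simp [sepSplitP, hc]

theorem sepSplitOn_eq (l : List Char) :
    PySem.Chars.splitOn l ['\n'] = (sepSplitP l).1 :: (sepSplitP l).2 := by
  rw [PySem.Chars.splitOn, sepSplitOn_go_eq l (l.length + 1) [] [] (Nat.lt_succ_self _)]
  simp

-- characterization of A's loop + final flush
theorem sepA_loop_eq (l : List Char) : ∀ (temp : List Char) (lines : List String),
    (let st := l.foldl sepAStep (temp, lines); st.2 ++ [String.ofList st.1])
      = lines ++ String.ofList (temp ++ sepBClean (sepSplitP l).1)
          :: (sepSplitP l).2.map (fun s => String.ofList (sepBClean s)) := by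
  induction l with
  | nil => intro temp lines; simp [sepSplitP, sepBClean]
  | cons c cs ih =>
    intro temp lines
    simp only [List.foldl_cons]
    by_cases h10 : c.toNat = 10
    · have hc : c = '\n' :=
        Char.ext (UInt32.toNat_inj.mp (h10 : c.toNat = ('\n').toNat))
      rw [show sepAStep (temp, lines) c = ([], lines ++ [String.ofList temp]) by
        simp only [sepAStep]; rw [if_pos (by omega)]]
      rw [ih [] (lines ++ [String.ofList temp])]
      simp [sepSplitP, hc, sepBClean]
    · have hc : c ≠ '\n' := by
        intro hh; exact h10 (by subst hh; rfl)
      by_cases hlo : c.toNat < 32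
      · rw [show sepAStep (temp, lines) c = (temp, lines) by
          simp only [sepAStep]; rw [if_neg (by omega), if_pos (by constructor <;> omega)]]
        rw [ih temp lines]
        have : sepBClean (c :: (sepSplitP cs).1) = sepBClean (sepSplitP cs).1 := by
          simp [sepBClean, List.filter_cons]; omega
        simp [sepSplitP, hc, this]
      · rw [show sepAStep (temp, lines) c = (temp ++ [c], lines) by
          simp only [sepAStep]; rw [if_neg (by omega), if_neg (by rintro ⟨-, h2⟩; omega)]]
        rw [ih (temp ++ [c]) lines]
        have : sepBClean (c :: (sepSplitP cs).1) = c :: sepBClean (sepSplitP cs).1 := by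
          simp [sepBClean, List.filter_cons]; omega
        simp [sepSplitP, hc, this]

-- ===== VERDICT (by name: the statement is the Claim_ definition above) =====
theorem seperate_msg_into_line_spec : Claim_equal_seperate_msg_into_line := by
  intro msg _
  unfold Spec_seperate_msg_into_line seperate_msg_into_line seperate_msg_into_line_alt
  rw [sepA_loop_eq msg.toList [] [], sepSplitOn_eq]
  simp
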